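-- pv_equiv track=rewrite | github.com/npalgit/project_mountain_view | bits/bitwiseAndRange.py | bitAndRange
-- ===== SOURCE A (Python) =====
-- def bitAndRange(m, n):
--     if m == 0: return 0
--     moveFac = 0
--     while m != n:
--         moveFac += 1
--         m >>= 1
--         n >>= 1
--
--     return m<<moveFac
-- ===== SOURCE B (Python) =====
-- def bitAndRange(m, n):
--     lo, hi = min(m, n), max(m, n)
--     while hi > lo:
--         hi &= hi - 1
--     return hi
-- ===== Notes on version B (the rewrite author's own statement) =====
-- stated objective: simpler
-- what changed: Replaces A's shift-both-until-equal loop with counter and shift-back by Brian Kernighan's method: clear the lowest set bit of max(m,n) until it is <= min(m,n); no shift counter and no special m==0 return.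
-- outside the precondition, e.g. on bitAndRange(0, -5): A returns 0, B does not finish within the time limit
import Mathlib
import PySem

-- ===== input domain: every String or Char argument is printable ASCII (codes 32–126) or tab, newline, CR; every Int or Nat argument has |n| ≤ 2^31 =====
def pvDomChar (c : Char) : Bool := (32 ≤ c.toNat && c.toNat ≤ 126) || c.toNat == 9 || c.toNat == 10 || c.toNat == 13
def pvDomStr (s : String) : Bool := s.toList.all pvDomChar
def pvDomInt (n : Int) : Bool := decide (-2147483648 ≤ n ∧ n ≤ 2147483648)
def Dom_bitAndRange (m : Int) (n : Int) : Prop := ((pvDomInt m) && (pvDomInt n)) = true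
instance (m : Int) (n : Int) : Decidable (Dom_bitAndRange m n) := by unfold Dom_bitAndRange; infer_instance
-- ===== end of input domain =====

-- B replaces A's shift-both-until-equal-then-shift-back loop by Kernighan's
-- clear-the-lowest-set-bit loop on max(m,n); same return value on Pre_.

-- ===== PORT A =====
-- the while loop: while m != n: moveFac += 1; m >>= 1; n >>= 1
-- (fuel only guards totality: inside Pre_ the loop is proved to end well before the fuel)
def bitAndRangeLoop (fuel : Nat) (m n : Int) (fac : Nat) : Int × Nat :=
  match fuel with
  | 0 => (m, fac)
  | fuel+1 => if m ≠ n then bitAndRangeLoop fuel (m >>> (1:Nat)) (n >>> (1:Nat)) (fac + 1) else (m, fac)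

def bitAndRange (m : Int) (n : Int) : Int :=
  if m = 0 then 0
  else
    (bitAndRangeLoop (m.natAbs + n.natAbs + 1) m n 0).1 <<<
      (bitAndRangeLoop (m.natAbs + n.natAbs + 1) m n 0).2   -- return m << moveFac

-- ===== PORT B =====
-- the while loop: while hi > lo: hi &= hi - 1   (Int.land is Python's & on ints)
def kernLoop (fuel : Nat) (lo hi : Int) : Int :=
  match fuel with
  | 0 => hi
  | fuel+1 => if hi > lo then kernLoop fuel lo (Int.land hi (hi - 1)) else hi

def bitAndRange_alt (m : Int) (n : Int) : Int :=
  kernLoop (m.natAbs + n.natAbs + 1) (min m n) (max m n)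

-- ===== PRECONDITION & SPEC =====
-- Pre_ excludes mixed-sign inputs: there A's loop never terminates (m and n shift
-- towards 0 and -1 respectively and never meet), except for the accidental m == 0
-- early return of 0 (with n < 0), where B's loop diverges instead.
def Pre_bitAndRange (m : Int) (n : Int) : Prop := (0 ≤ m ∧ 0 ≤ n) ∨ (m < 0 ∧ n < 0)
instance (m : Int) (n : Int) : Decidable (Pre_bitAndRange m n) := by unfold Pre_bitAndRange; infer_instance

def pvWitness_bitAndRange : Int × Int := (5, 7)

def Spec_bitAndRange (m : Int) (n : Int) (out : Int) : Prop := out = bitAndRange_alt m n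
instance (m : Int) (n : Int) (out : Int) : Decidable (Spec_bitAndRange m n out) := by unfold Spec_bitAndRange; infer_instance

-- ===== CLAIM (what is proved, stated in full; the proofs are below) =====
def Claim_equal_bitAndRange : Prop := ∀ (m : Int) (n : Int), Dom_bitAndRange m n → Pre_bitAndRange m n → Spec_bitAndRange m n (bitAndRange m n)

-- ===== LEMMAS AND PROOFS =====

-- proof-side spec: shift both right until equal, doubling the result on the way back
def sweep (fuel : Nat) (m n : Int) : Int :=
  match fuel with
  | 0 => m
  | fuel+1 => if m = n then m else 2 * sweep fuel (m >>> (1:Nat)) (n >>> (1:Nat))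

theorem pvShiftRightOne (x : Int) : x >>> (1:Nat) = x / 2 := by
  simp [Int.shiftRight_eq_div_pow]

theorem pvLandSelf (q : Int) : Int.land q q = q := by
  cases q with
  | ofNat m => show Int.ofNat (Nat.land m m) = Int.ofNat m
               rw [show Nat.land m m = m &&& m from rfl, Nat.and_self]
  | negSucc m => show Int.negSucc (Nat.lor m m) = Int.negSucc m
                 rw [show Nat.lor m m = m ||| m from rfl, Nat.or_self]

theorem pvLandTwoMul (z : Int) : Int.land (2*z) (2*z-1) = 2 * Int.land z (z-1) := by
  have h := Int.land_bit false z true (z-1)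
  simp only [Int.bit_val, cond] at h
  have e1 : (2*(z-1) + 1 : Int) = 2*z - 1 := by ring
  rw [e1] at h
  simpa using h

theorem pvLandOdd (h : Int) (hodd : h % 2 = 1) : Int.land h (h-1) = h - 1 := by
  obtain ⟨q, rfl⟩ : ∃ q, h = 2*q+1 := ⟨h/2, by omega⟩
  have hb := Int.land_bit true q false q
  simp only [Int.bit_val, cond] at hb
  rw [pvLandSelf] at hb
  have e : (2*q+1 : Int) - 1 = 2*q + 0 := by ring
  rw [e]
  simpa using hb

theorem sweep_self (f : Nat) (m : Int) : sweep f m m = m := by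
  cases f <;> simp [sweep]

theorem sweep_zero_symm_aux (f : Nat) (n : Int) (hn : 0 ≤ n) : sweep f 0 n = 0 := by
  induction f generalizing n with
  | zero => simp [sweep]
  | succ f ih =>
    simp only [sweep]
    by_cases h : (0:Int) = n
    · simp [h]
    · rw [if_neg h, pvShiftRightOne, pvShiftRightOne]
      have : ((0:Int)/2) = 0 := by norm_num
      rw [this, ih (n/2) (by omega)]
      ring

-- A's loop computes sweep, shifted: unconditional in the fuel
theorem loopA_eq_sweep (f : Nat) (m n : Int) (fac : Nat) :
    (bitAndRangeLoop f m n fac).1 <<< (bitAndRangeLoop f m n fac).2 = sweep f m n <<< fac := by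
  induction f generalizing m n fac with
  | zero => simp [bitAndRangeLoop, sweep]
  | succ f ih =>
    simp only [bitAndRangeLoop, sweep]
    by_cases h : m = n
    · simp [h]
    · rw [if_pos h, if_neg h, ih]
      rw [Int.shiftLeft_eq, Int.shiftLeft_eq, pow_succ]
      ring

theorem kern_self (f : Nat) (lo : Int) : kernLoop f lo lo = lo := by
  cases f <;> simp [kernLoop]

-- halving lemma: Kernighan on even values is Kernighan on the halves, doubled
theorem kern_halve (f : Nat) (lo z : Int) : kernLoop f lo (2*z) = 2 * kernLoop f (lo/2) z := by
  induction f generalizing z with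
  | zero => simp [kernLoop]
  | succ f ih =>
    simp only [kernLoop]
    by_cases h : 2*z > lo
    · rw [if_pos h, if_pos (by omega : z > lo/2), pvLandTwoMul, ih]
    · rw [if_neg h, if_neg (by omega : ¬ z > lo/2)]

-- kernLoop on (min,max) equals sweep in either argument order, same sign, enough fuel
theorem kern_eq_sweep_nonneg (k : Nat) :
    ∀ (f1 f2 : Nat) (lo hi a b : Int), hi.toNat = k → 0 ≤ lo → lo ≤ hi →
      (a = lo ∧ b = hi) ∨ (a = hi ∧ b = lo) →
      hi.toNat ≤ f1 → hi.toNat ≤ f2 → kernLoop f1 lo hi = sweep f2 a b := by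
  induction k using Nat.strong_induction_on with
  | _ k ih =>
    intro f1 f2 lo hi a b hk hlo hle hab hf1 hf2
    rcases eq_or_lt_of_le hle with heq | hlt
    · subst heq
      have ha : a = lo := by rcases hab with ⟨h1, _⟩ | ⟨h1, _⟩ <;> omega
      have hb : b = lo := by rcases hab with ⟨_, h1⟩ | ⟨_, h1⟩ <;> omega
      rw [kern_self, ha, hb, sweep_self]
    · have hhi1 : (1:Int) ≤ hi := by omega
      have hne : ¬ a = b := by rcases hab with ⟨h1, h2⟩ | ⟨h1, h2⟩ <;> omega
      obtain ⟨g, rfl⟩ : ∃ g, f2 = g + 1 := ⟨f2 - 1, by omega⟩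
      have hsw : sweep (g+1) a b = 2 * sweep g (a/2) (b/2) := by
        simp only [sweep]
        rw [if_neg hne, pvShiftRightOne, pvShiftRightOne]
      have hab2 : (a/2 = lo/2 ∧ b/2 = hi/2) ∨ (a/2 = hi/2 ∧ b/2 = lo/2) := by
        rcases hab with ⟨h1, h2⟩ | ⟨h1, h2⟩
        · left; omega
        · right; omega
      have hrec2 : (hi/2).toNat < k := by omega
      rcases Int.emod_two_eq hi with he | ho
      · -- hi even
        have h2 : hi = 2 * (hi/2) := by omega
        have hker := kern_halve f1 lo (hi/2)
        rw [← h2] at hker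
        rw [hker, hsw,
          ih (hi/2).toNat hrec2 f1 g (lo/2) (hi/2) (a/2) (b/2) rfl (by omega) (by omega) hab2
            (by omega) (by omega)]
      · -- hi odd: one step goes to hi - 1
        obtain ⟨c, rfl⟩ : ∃ c, f1 = c + 1 := ⟨f1 - 1, by omega⟩
        have hstep : kernLoop (c+1) lo hi = kernLoop c lo (hi - 1) := by
          simp only [kernLoop]
          rw [if_pos (by omega : hi > lo), pvLandOdd hi ho]
        rcases eq_or_lt_of_le (by omega : lo ≤ hi - 1) with heq1 | hlt1
        · -- hi - 1 = lo: both halves coincide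
          rw [hstep, ← heq1, kern_self, hsw]
          have hhalf : a/2 = b/2 := by
            rcases hab with ⟨h1, h2⟩ | ⟨h1, h2⟩ <;> omega
          rw [hhalf, sweep_self]
          rcases hab with ⟨h1, h2⟩ | ⟨h1, h2⟩ <;> omega
        · -- hi - 1 > lo, hi - 1 even
          have h2 : hi - 1 = 2 * (hi/2) := by omega
          have hker := kern_halve c lo (hi/2)
          rw [← h2] at hker
          rw [hstep, hker, hsw,
            ih (hi/2).toNat hrec2 c g (lo/2) (hi/2) (a/2) (b/2) rfl (by omega) (by omega) hab2
              (by omega) (by omega)]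

theorem kern_eq_sweep_neg (k : Nat) :
    ∀ (f1 f2 : Nat) (lo hi a b : Int), lo.natAbs = k → lo ≤ hi → hi < 0 →
      (a = lo ∧ b = hi) ∨ (a = hi ∧ b = lo) →
      lo.natAbs ≤ f1 → lo.natAbs ≤ f2 → kernLoop f1 lo hi = sweep f2 a b := by
  induction k using Nat.strong_induction_on with
  | _ k ih =>
    intro f1 f2 lo hi a b hk hle hhi hab hf1 hf2
    rcases eq_or_lt_of_le hle with heq | hlt
    · subst heq
      have ha : a = lo := by rcases hab with ⟨h1, _⟩ | ⟨h1, _⟩ <;> omega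
      have hb : b = lo := by rcases hab with ⟨_, h1⟩ | ⟨_, h1⟩ <;> omega
      rw [kern_self, ha, hb, sweep_self]
    · have hlo2 : lo ≤ -2 := by omega
      have hne : ¬ a = b := by rcases hab with ⟨h1, h2⟩ | ⟨h1, h2⟩ <;> omega
      obtain ⟨g, rfl⟩ : ∃ g, f2 = g + 1 := ⟨f2 - 1, by omega⟩
      have hsw : sweep (g+1) a b = 2 * sweep g (a/2) (b/2) := by
        simp only [sweep]
        rw [if_neg hne, pvShiftRightOne, pvShiftRightOne]
      have hab2 : (a/2 = lo/2 ∧ b/2 = hi/2) ∨ (a/2 = hi/2 ∧ b/2 = lo/2) := by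
        rcases hab with ⟨h1, h2⟩ | ⟨h1, h2⟩
        · left; omega
        · right; omega
      have hrec2 : (lo/2).natAbs < k := by omega
      rcases Int.emod_two_eq hi with he | ho
      · -- hi even
        have h2 : hi = 2 * (hi/2) := by omega
        have hker := kern_halve f1 lo (hi/2)
        rw [← h2] at hker
        rw [hker, hsw,
          ih (lo/2).natAbs hrec2 f1 g (lo/2) (hi/2) (a/2) (b/2) rfl (by omega) (by omega) hab2
            (by omega) (by omega)]
      · -- hi odd
        obtain ⟨c, rfl⟩ : ∃ c, f1 = c + 1 := ⟨f1 - 1, by omega⟩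
        have hstep : kernLoop (c+1) lo hi = kernLoop c lo (hi - 1) := by
          simp only [kernLoop]
          rw [if_pos (by omega : hi > lo), pvLandOdd hi ho]
        rcases eq_or_lt_of_le (by omega : lo ≤ hi - 1) with heq1 | hlt1
        · rw [hstep, ← heq1, kern_self, hsw]
          have hhalf : a/2 = b/2 := by
            rcases hab with ⟨h1, h2⟩ | ⟨h1, h2⟩ <;> omega
          rw [hhalf, sweep_self]
          rcases hab with ⟨h1, h2⟩ | ⟨h1, h2⟩ <;> omega
        · have h2 : hi - 1 = 2 * (hi/2) := by omega
          have hker := kern_halve c lo (hi/2)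
          rw [← h2] at hker
          rw [hstep, hker, hsw,
            ih (lo/2).natAbs hrec2 c g (lo/2) (hi/2) (a/2) (b/2) rfl (by omega) (by omega) hab2
              (by omega) (by omega)]

theorem bitAndRange_eq_sweep (m n : Int) (h : Pre_bitAndRange m n) :
    bitAndRange m n = sweep (m.natAbs + n.natAbs + 1) m n := by
  unfold bitAndRange
  by_cases hm : m = 0
  · subst hm
    rw [if_pos rfl, sweep_zero_symm_aux]
    rcases h with ⟨_, hn⟩ | ⟨hm0, _⟩
    · exact hn
    · omega
  · rw [if_neg hm]
    have h0 := loopA_eq_sweep (m.natAbs + n.natAbs + 1) m n 0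
    rw [Int.shiftLeft_eq (sweep (m.natAbs + n.natAbs + 1) m n) 0, pow_zero, mul_one] at h0
    exact h0

theorem bitAndRange_alt_eq_sweep (m n : Int) (h : Pre_bitAndRange m n) :
    bitAndRange_alt m n = sweep (m.natAbs + n.natAbs + 1) m n := by
  unfold bitAndRange_alt
  set F := m.natAbs + n.natAbs + 1 with hF
  rcases le_total m n with hmn | hmn
  · rw [min_eq_left hmn, max_eq_right hmn]
    rcases h with ⟨hm, hn⟩ | ⟨hm, hn⟩
    · exact kern_eq_sweep_nonneg n.toNat F F m n m n rfl hm hmn (Or.inl ⟨rfl, rfl⟩)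
        (by omega) (by omega)
    · exact kern_eq_sweep_neg m.natAbs F F m n m n rfl hmn hn (Or.inl ⟨rfl, rfl⟩)
        (by omega) (by omega)
  · rw [min_eq_right hmn, max_eq_left hmn]
    rcases h with ⟨hm, hn⟩ | ⟨hm, hn⟩
    · exact kern_eq_sweep_nonneg m.toNat F F n m m n rfl hn hmn (Or.inr ⟨rfl, rfl⟩)
        (by omega) (by omega)
    · exact kern_eq_sweep_neg n.natAbs F F n m m n rfl hmn hm (Or.inr ⟨rfl, rfl⟩)
        (by omega) (by omega)

-- ===== VERDICT (by name: the statement is the Claim_ definition above) =====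
theorem bitAndRange_spec : Claim_equal_bitAndRange := by
  intro m n _ hpre
  unfold Spec_bitAndRange
  rw [bitAndRange_eq_sweep m n hpre, bitAndRange_alt_eq_sweep m n hpre]
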